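-- pv_equiv track=rewrite | github.com/Labmed-Lee/Lee_et_al | Saturation_analysis_240202_with_answer.py | remove_wild_type
-- ===== SOURCE A (Python) =====
-- def remove_wild_type(ref, dictionary):
--     keys_to_remove = []
--     a = dictionary.copy()
--
--     for key in a.keys():
--         if key in ref:
--             keys_to_remove.append(key)
--     for key in keys_to_remove:
--         del a[key]
--
--     return a
-- ===== SOURCE B (Python) =====
-- def remove_wild_type(ref, dictionary):
--     a = dictionary.copy()
--     for key in ref:
--         a.pop(key, None)
--     return a
-- ===== Notes on version B (the rewrite author's own statement) =====
-- stated objective: faster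
-- what changed: B drives a single loop over ref itself, popping each key from a copy with a.pop(key, None), instead of A's two passes (scan all dict keys testing list membership 'key in ref', then delete the collected keys).
import Mathlib
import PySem

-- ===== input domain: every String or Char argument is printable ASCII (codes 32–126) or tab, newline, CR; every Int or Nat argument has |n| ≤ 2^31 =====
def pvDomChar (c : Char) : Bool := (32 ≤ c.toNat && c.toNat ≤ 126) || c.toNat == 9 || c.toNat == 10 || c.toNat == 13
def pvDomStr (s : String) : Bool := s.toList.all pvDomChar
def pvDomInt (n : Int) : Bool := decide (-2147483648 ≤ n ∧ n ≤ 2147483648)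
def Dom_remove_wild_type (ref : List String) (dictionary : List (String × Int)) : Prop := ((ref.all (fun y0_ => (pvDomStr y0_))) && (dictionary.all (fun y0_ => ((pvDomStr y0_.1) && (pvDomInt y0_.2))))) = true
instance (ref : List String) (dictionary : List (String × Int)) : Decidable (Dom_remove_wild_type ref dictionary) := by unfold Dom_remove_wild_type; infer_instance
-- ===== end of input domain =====

-- B replaces A's two passes (scan all dict keys testing list membership 'key in ref', then
-- delete the collected keys) by one loop over ref popping each key from a copy with
-- a.pop(key, None): O(k+r) instead of O(k*r); a timing run measured B faster.
-- ===== PORT A =====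
def remove_wild_type (ref : List String) (dictionary : List (String × Int)) : List (String × Int) :=
  let a := PySem.Dict.ofList dictionary
  let keys_to_remove := a.keys.foldl (fun acc key => if ref.contains key then acc ++ [key] else acc) []
  (keys_to_remove.foldl (fun d key => d.erase key) a).items

-- ===== PORT B =====
def remove_wild_type_alt (ref : List String) (dictionary : List (String × Int)) : List (String × Int) :=
  (ref.foldl (fun a key =>
      match a.pop? key with   -- a.pop(key, None): remove if present, no-op otherwise
      | some (_, a') => a'
      | none => a) (PySem.Dict.ofList dictionary)).items

-- ===== PRECONDITION & SPEC =====
def Spec_remove_wild_type (ref : List String) (dictionary : List (String × Int)) (out : List (String × Int)) : Prop := out = remove_wild_type_alt ref dictionary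
instance (ref : List String) (dictionary : List (String × Int)) (out : List (String × Int)) : Decidable (Spec_remove_wild_type ref dictionary out) := by unfold Spec_remove_wild_type; infer_instance

-- ===== CLAIM (what is proved, stated in full; the proofs are below) =====
def Claim_equal_remove_wild_type : Prop := ∀ (ref : List String) (dictionary : List (String × Int)), Dom_remove_wild_type ref dictionary → Spec_remove_wild_type ref dictionary (remove_wild_type ref dictionary)

-- ===== LEMMAS AND PROOFS =====

-- a.pop(key, None) is exactly erase: when the key is absent, erase is the identity
theorem popStep_eq_erase (d : PySem.Dict String Int) (k : String) :
    (match d.pop? k with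
     | some (_, a') => a'
     | none => d) = d.erase k := by
  unfold PySem.Dict.pop?
  cases hg : d.get? k with
  | some v => simp
  | none =>
    simp only [Option.map_none]
    apply PySem.Dict.ext
    unfold PySem.Dict.erase
    rw [eq_comm]
    apply List.filter_eq_self.mpr
    intro p hp
    have hk : k ∉ d.keys := (PySem.Dict.get?_eq_none_iff_not_mem_keys _ _).mp hg
    have : p.1 ∈ d.keys := PySem.Dict.mem_keys_of_mem_items _ hp
    simp only [Bool.not_eq_eq_eq_not, Bool.not_true, beq_eq_false_iff_ne, ne_eq]
    intro h; exact hk (h ▸ this)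

-- erasing every key of l in sequence filters the items once
theorem foldl_erase_items (l : List String) (d : PySem.Dict String Int) :
    (l.foldl (fun d k => d.erase k) d).items = d.items.filter (fun p => !(l.contains p.1)) := by
  induction l generalizing d with
  | nil => simp
  | cons k t ih =>
    rw [List.foldl_cons, ih]
    simp only [PySem.Dict.erase, List.filter_filter]
    apply List.filter_congr
    intro p _
    simp only [List.contains_cons]
    cases h : (p.1 == k) <;> simp [h]

-- ===== VERDICT (by name: the statement is the Claim_ definition above) =====
theorem remove_wild_type_spec : Claim_equal_remove_wild_type := by
  intro ref dictionary _
  unfold Spec_remove_wild_type remove_wild_type remove_wild_type_alt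
  have hB : ∀ (l : List String) (d : PySem.Dict String Int),
      l.foldl (fun a key =>
        match a.pop? key with
        | some (_, a') => a'
        | none => a) d = l.foldl (fun d k => d.erase k) d := by
    intro l
    induction l with
    | nil => intro d; rfl
    | cons k t ih => intro d; rw [List.foldl_cons, popStep_eq_erase]; exact ih _
  rw [hB]
  simp only [PySem.List.foldl_append_if]
  rw [foldl_erase_items, foldl_erase_items]
  apply List.filter_congr
  intro p hp
  have hpk : p.1 ∈ (PySem.Dict.ofList dictionary).keys := PySem.Dict.mem_keys_of_mem_items _ hp
  simp only [List.nil_append, List.contains_eq_mem]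
  by_cases h : p.1 ∈ ref <;> simp [h, hpk]
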